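-- pv_equiv track=rewrite | github.com/MHovenkamp/ATP | compiler_base.py | createLookupTable
-- ===== SOURCE A (Python) =====
-- from typing import List, TypeVar, Union, Tuple
-- import copy
--
-- def createLookupTable( line_numbers : List[str], asm_string : str = "\nlookUpTable:" ) -> str:
--     """creates a lookup table for branching to lien number labels
--
--     Args:
--         line_numbers (List[str]): list of al found line numbers
--         asm_string (str, optional): asm commands to execute. Defaults to "\nlookUpTable:".
--
--     Returns:
--         str: lookup table asm commands
--     """
--     line_numbers_copy = copy.copy(line_numbers)
--     asm_string_copy = copy.copy(asm_string)
--
--     if len(line_numbers_copy) == 0: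
--         return asm_string_copy+"\nBNE end_of_program_error"
--
--     head, *tail = line_numbers_copy
--
--     asm_string_copy += "\nCMP R0, #" + str(head)
--     asm_string_copy += "\nBEQ _line_" + str(head)
--     return createLookupTable(tail, asm_string_copy)
-- ===== SOURCE B (Python) =====
-- def createLookupTable(line_numbers, asm_string="\nlookUpTable:"):
--     result = asm_string
--     for n in line_numbers:
--         result += "\nCMP R0, #" + str(n)
--         result += "\nBEQ _line_" + str(n)
--     return result + "\nBNE end_of_program_error"
-- ===== Notes on version B (the rewrite author's own statement) =====
-- stated objective: simpler
-- what changed: Replaced the accumulator-passing tail recursion (with copy.copy of both arguments at every level) with one flat loop that appends the CMP/BEQ pair per line number and adds the BNE-error suffix once after the loop.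
import Mathlib
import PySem

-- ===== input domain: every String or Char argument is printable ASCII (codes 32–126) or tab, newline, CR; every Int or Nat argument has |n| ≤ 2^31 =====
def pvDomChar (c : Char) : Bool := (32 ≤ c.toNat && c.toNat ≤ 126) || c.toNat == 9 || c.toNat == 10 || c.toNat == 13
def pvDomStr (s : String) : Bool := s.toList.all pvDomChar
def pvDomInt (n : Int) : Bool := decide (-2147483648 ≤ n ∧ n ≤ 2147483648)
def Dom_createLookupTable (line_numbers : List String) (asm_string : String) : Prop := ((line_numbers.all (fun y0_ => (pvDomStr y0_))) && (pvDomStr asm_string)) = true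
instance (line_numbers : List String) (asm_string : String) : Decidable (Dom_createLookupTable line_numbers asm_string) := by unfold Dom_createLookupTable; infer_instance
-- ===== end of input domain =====

-- B replaces A's accumulator-passing tail recursion with a single flat loop appending CMP/BEQ per line number and the BNE-error suffix once at the end (simpler; same output).


-- ===== PORT A =====
-- tail recursion over the list, threading the accumulated string (copy.copy of a str/list is value-identity)
def createLookupTable (line_numbers : List String) (asm_string : String) : String :=
  match line_numbers with
  | [] => asm_string ++ "\nBNE end_of_program_error"
  | head :: tail =>
      createLookupTable tail (asm_string ++ "\nCMP R0, #" ++ head ++ "\nBEQ _line_" ++ head)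

-- ===== PORT B =====
-- one flat pass (Source B's for-loop as a foldl), then the error suffix appended once
def createLookupTable_alt (line_numbers : List String) (asm_string : String) : String :=
  (line_numbers.foldl (fun acc n => acc ++ "\nCMP R0, #" ++ n ++ "\nBEQ _line_" ++ n) asm_string)
    ++ "\nBNE end_of_program_error"

-- ===== PRECONDITION & SPEC =====
def Spec_createLookupTable (line_numbers : List String) (asm_string : String) (out : String) : Prop := out = createLookupTable_alt line_numbers asm_string
instance (line_numbers : List String) (asm_string : String) (out : String) : Decidable (Spec_createLookupTable line_numbers asm_string out) := by unfold Spec_createLookupTable; infer_instance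

-- ===== CLAIM (what is proved, stated in full; the proofs are below) =====
def Claim_equal_createLookupTable : Prop := ∀ (line_numbers : List String) (asm_string : String), Dom_createLookupTable line_numbers asm_string → Spec_createLookupTable line_numbers asm_string (createLookupTable line_numbers asm_string)

-- ===== LEMMAS AND PROOFS =====

-- ===== VERDICT (by name: the statement is the Claim_ definition above) =====
theorem createLookupTable_alt_eq (line_numbers : List String) (asm_string : String) :
    createLookupTable line_numbers asm_string = createLookupTable_alt line_numbers asm_string := by
  induction line_numbers generalizing asm_string with
  | nil => rfl
  | cons h t ih => simp [createLookupTable, createLookupTable_alt, ih, List.foldl]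

theorem createLookupTable_spec : Claim_equal_createLookupTable := by
  intro ls s _
  exact createLookupTable_alt_eq ls s
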